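-- pv_equiv track=rewrite | github.com/karthik-krishnan/datagenie | backend/services/compliance_detector.py | _domain_boost
-- ===== SOURCE A (Python) =====
-- from typing import Any, Dict, List, Optional, Set
--
-- def _domain_boost(base_frameworks: List[str], domain_frameworks: Set[str]) -> Set[str]:
--     """Add domain-implied frameworks that don't conflict with the base."""
--     # Only add GDPR/CCPA if they're in domain context (jurisdictional frameworks)
--     extras = set()
--     for fw in domain_frameworks:
--         if fw in ("GDPR", "CCPA") and "PII" in base_frameworks:
--             extras.add(fw)
--         elif fw in ("HIPAA",) and any(f in base_frameworks for f in ("PII", "HIPAA")):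
--             extras.add(fw)
--     return extras
-- ===== SOURCE B (Python) =====
-- def _domain_boost(base_frameworks, domain_frameworks):
--     """Start from the full intersection with the candidate tags, then
--     subtract whatever the base frameworks rule out."""
--     extras = domain_frameworks & {"GDPR", "CCPA", "HIPAA"}
--     if "PII" not in base_frameworks:
--         extras -= {"GDPR", "CCPA"}
--         if "HIPAA" not in base_frameworks:
--             extras -= {"HIPAA"}
--     return extras
-- ===== Notes on version B (the rewrite author's own statement) =====
-- stated objective: alternative
-- what changed: A accumulates extras additively by looping over the domain set with a per-element if/elif membership chain; B works subtractively: it intersects the domain with the fixed candidate tags once and then stage-wise subtracts the tag groups the base frameworks rule out, never branching per domain element.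
import Mathlib
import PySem

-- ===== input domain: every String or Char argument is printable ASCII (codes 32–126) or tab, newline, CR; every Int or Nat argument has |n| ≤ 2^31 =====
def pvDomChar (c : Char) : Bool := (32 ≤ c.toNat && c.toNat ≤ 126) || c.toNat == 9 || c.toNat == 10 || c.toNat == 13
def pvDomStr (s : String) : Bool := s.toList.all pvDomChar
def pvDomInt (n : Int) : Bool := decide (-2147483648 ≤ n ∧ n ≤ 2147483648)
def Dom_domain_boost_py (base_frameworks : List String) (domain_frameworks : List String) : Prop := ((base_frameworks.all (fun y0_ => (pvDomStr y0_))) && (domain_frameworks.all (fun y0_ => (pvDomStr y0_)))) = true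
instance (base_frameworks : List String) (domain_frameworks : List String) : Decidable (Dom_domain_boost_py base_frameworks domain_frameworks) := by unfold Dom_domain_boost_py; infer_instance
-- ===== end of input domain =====

-- B is subtractive instead of additive: it intersects the domain with the fixed
-- candidate tags once, then stage-wise subtracts the tag groups the base rules out.

-- ===== PORT A =====
def domain_boost_py (base_frameworks : List String) (domain_frameworks : List String) : List String :=
  domain_frameworks.foldl
    (fun extras fw =>
      if (fw = "GDPR" || fw = "CCPA") && base_frameworks.contains "PII" then
        PySem.Set.add extras fw
      else if (fw = "HIPAA") && (base_frameworks.contains "PII" || base_frameworks.contains "HIPAA") then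
        PySem.Set.add extras fw
      else extras)
    PySem.Set.empty

-- ===== PORT B =====
def domain_boost_py_alt (base_frameworks : List String) (domain_frameworks : List String) : List String :=
  let extras := PySem.Set.inter (PySem.Set.ofList domain_frameworks) ["GDPR", "CCPA", "HIPAA"]
  if !(base_frameworks.contains "PII") then
    let extras := PySem.Set.diff extras ["GDPR", "CCPA"]
    if !(base_frameworks.contains "HIPAA") then PySem.Set.diff extras ["HIPAA"]
    else extras
  else extras

-- ===== PRECONDITION & SPEC =====
def Spec_domain_boost_py (base_frameworks : List String) (domain_frameworks : List String) (out : List String) : Prop := out = domain_boost_py_alt base_frameworks domain_frameworks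
instance (base_frameworks : List String) (domain_frameworks : List String) (out : List String) : Decidable (Spec_domain_boost_py base_frameworks domain_frameworks out) := by unfold Spec_domain_boost_py; infer_instance

-- ===== CLAIM =====
def Claim_equal_domain_boost_py : Prop := ∀ (base_frameworks : List String) (domain_frameworks : List String), Dom_domain_boost_py base_frameworks domain_frameworks → Spec_domain_boost_py base_frameworks domain_frameworks (domain_boost_py base_frameworks domain_frameworks)

-- ===== LEMMAS AND PROOFS =====

-- folding 'add if p' equals folding 'add' over the filtered list
theorem foldl_if_add (p : String → Bool) (xs : List String) (acc : PySem.Set String) :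
    xs.foldl (fun s x => if p x then PySem.Set.add s x else s) acc
      = (xs.filter p).foldl PySem.Set.add acc := by
  induction xs generalizing acc with
  | nil => rfl
  | cons x xs ih =>
    by_cases h : p x <;> simp [h, List.foldl, ih]

-- A's two-branch step is the single-predicate 'add if pA' step
theorem step_eq (b : List String) :
    (fun (s : PySem.Set String) (fw : String) =>
        if (fw = "GDPR" || fw = "CCPA") && b.contains "PII" then PySem.Set.add s fw
        else if (fw = "HIPAA") && (b.contains "PII" || b.contains "HIPAA") then PySem.Set.add s fw
        else s)
      = (fun s fw =>
          if ((fw = "GDPR" || fw = "CCPA") && b.contains "PII")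
              || ((fw = "HIPAA") && (b.contains "PII" || b.contains "HIPAA")) then
            PySem.Set.add s fw
          else s) := by
  funext s fw
  split_ifs <;> simp_all
  all_goals tauto

-- deduplication (keep-first) commutes with filtering
theorem ofList_filter (p : String → Bool) (xs : List String) :
    PySem.Set.ofList (xs.filter p) = (PySem.Set.ofList xs).filter p := by
  induction xs with
  | nil => rfl
  | cons x xs ih =>
    by_cases h : p x
    · simp only [List.filter_cons, h, if_pos, PySem.Set.ofList_cons, ih,
        PySem.Set.discard, List.filter_filter]
      simp [Bool.and_comm]
    · simp only [List.filter_cons, h, PySem.Set.ofList_cons, PySem.Set.discard,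
        List.filter_filter]
      simp only [Bool.false_eq_true, if_false]
      rw [ih]
      apply List.filter_congr
      intro y _
      by_cases hy : y = x
      · subst hy; simp [h]
      · simp [hy]

-- ===== VERDICT =====

theorem domain_boost_py_spec : Claim_equal_domain_boost_py := by
  intro b d _
  unfold Spec_domain_boost_py domain_boost_py domain_boost_py_alt
  rw [step_eq]
  simp only [PySem.Set.empty]
  rw [foldl_if_add, ← PySem.Set.ofList_eq_foldl, ofList_filter]
  simp only [PySem.Set.inter, PySem.Set.diff, List.filter_filter]
  by_cases h1 : b.contains "PII" = true <;> by_cases h2 : b.contains "HIPAA" = true <;>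
    simp only [h1, h2, Bool.not_true, Bool.not_false, if_true, if_false,
      Bool.false_eq_true] <;>
    (apply List.filter_congr
     intro fw _
     by_cases g1 : fw = "GDPR" <;> by_cases g2 : fw = "CCPA" <;> by_cases g3 : fw = "HIPAA" <;>
       simp [g1, g2, g3, PySem.Set.contains])
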